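-- pv_equiv track=rewrite | github.com/Om-Bhandarkar/Python | Number/1.py | fn
-- ===== SOURCE A (Python) =====
-- def fn(num):
--     sum=0
--     temp1 = num
--     while (temp1 != 0):
--         retVal = temp1 % 10
--         temp1 = temp1 // 10
--         sum = sum + retVal
--
--     if (num % sum == 0):
--         return num
--     else:
--         return 0
-- ===== SOURCE B (Python) =====
-- def fn(num):
--     s = sum(ord(d) - 48 for d in str(num))
--     return num if num % s == 0 else 0
-- ===== Notes on version B (the rewrite author's own statement) =====
-- stated objective: idiomatic
-- what changed: B obtains the digit sum by summing the character codes of str(num) in one pass instead of A's while-loop of repeated %10 / //10 extraction, keeping the same num-or-0 return.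
import Mathlib
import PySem

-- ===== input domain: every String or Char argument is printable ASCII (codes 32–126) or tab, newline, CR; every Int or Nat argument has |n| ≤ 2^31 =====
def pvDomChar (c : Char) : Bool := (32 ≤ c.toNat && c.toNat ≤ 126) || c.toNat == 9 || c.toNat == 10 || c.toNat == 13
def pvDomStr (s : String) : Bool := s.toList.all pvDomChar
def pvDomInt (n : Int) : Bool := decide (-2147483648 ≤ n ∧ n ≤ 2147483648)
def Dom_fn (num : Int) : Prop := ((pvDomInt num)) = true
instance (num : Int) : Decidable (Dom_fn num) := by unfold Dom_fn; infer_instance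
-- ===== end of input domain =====

-- B computes the digit sum by one pass over the characters of str(num) instead of A's
-- repeated %10 / //10 extraction loop; same num-or-0 return contract (objective: idiomatic).


-- ===== PORT A =====
-- A's 'while temp1 != 0' loop; the 'temp1 ≤ 0 → sum' guard only makes the recursion total
-- (Python diverges for temp1 < 0, and Pre_fn excludes num ≤ 0).
def fnLoop (temp1 sum : Int) : Int :=
  if temp1 ≤ 0 then sum
  else fnLoop (PySem.Int.floordiv temp1 10) (sum + PySem.Int.mod temp1 10)
termination_by temp1.toNat
decreasing_by
  simp only [PySem.Int.floordiv]
  rw [Int.fdiv_eq_ediv_of_nonneg _ (by norm_num)]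
  omega

def fn (num : Int) : Int :=
  let sum := fnLoop num 0
  if PySem.Int.mod num sum = 0 then num else 0

-- ===== PORT B =====
-- sum(ord(d) - 48 for d in str(num)): exact — ord(c) is c.toNat
def fn_alt (num : Int) : Int :=
  let s := (PySem.Int.toStr num).toList.foldl (fun acc d => acc + ((d.toNat : Int) - 48)) 0
  if PySem.Int.mod num s = 0 then num else 0

-- ===== PRECONDITION & SPEC =====
-- Pre_ excludes num = 0 (A raises ZeroDivisionError: the digit sum is 0) and num < 0
-- (A's while loop never terminates, since temp1 // 10 stalls at -1); A returns on no excluded input.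
def Pre_fn (num : Int) : Prop := 0 < num
instance (num : Int) : Decidable (Pre_fn num) := by unfold Pre_fn; infer_instance
def pvWitness_fn : Int := 12

def Spec_fn (num : Int) (out : Int) : Prop := out = fn_alt num
instance (num : Int) (out : Int) : Decidable (Spec_fn num out) := by unfold Spec_fn; infer_instance

-- ===== CLAIM (what is proved, stated in full; the proofs are below) =====
def Claim_equal_fn : Prop := ∀ (num : Int), Dom_fn num → Pre_fn num → Spec_fn num (fn num)

-- ===== LEMMAS AND PROOFS =====

-- proof-side digit sum of a natural number
def dsum : Nat → Int
  | 0 => 0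
  | n+1 => ((n+1) % 10 : Nat) + dsum ((n+1) / 10)
decreasing_by exact Nat.div_lt_self (Nat.succ_pos n) (by norm_num)

lemma dsum_eq (n : Nat) (h : 0 < n) : dsum n = ((n % 10 : Nat) : Int) + dsum (n / 10) := by
  obtain ⟨m, rfl⟩ := Nat.exists_eq_succ_of_ne_zero (Nat.pos_iff_ne_zero.mp h)
  rw [dsum]

lemma fnLoop_eq (t s : Int) : 0 ≤ t → fnLoop t s = dsum t.toNat + s := by
  induction t, s using fnLoop.induct with
  | case1 t s hle =>
    intro h0
    have : t = 0 := le_antisymm hle h0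
    subst this
    simp [fnLoop, dsum]
  | case2 t s hgt ih =>
    intro _
    have ht : 0 < t := by omega
    rw [fnLoop]
    simp only [if_neg (by omega : ¬ t ≤ 0)]
    have hfd : PySem.Int.floordiv t 10 = t / 10 := by simp [pysem]
    have hmd : PySem.Int.mod t 10 = t % 10 := by simp [pysem]
    rw [ih (by rw [hfd]; positivity)]
    rw [hfd, hmd, dsum_eq t.toNat (by omega)]
    have e1 : (t / 10).toNat = t.toNat / 10 := by omega
    have e2 : (t % 10 : Int) = ((t.toNat % 10 : Nat) : Int) := by omega
    rw [e1, e2]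
    ring

-- char value of a decimal digit character
lemma digitChar_val (d : Nat) (hd : d < 10) : ((Nat.digitChar d).toNat : Int) - 48 = (d : Int) := by
  interval_cases d <;> decide

def charSum (cs : List Char) : Int := (cs.map (fun d => ((d.toNat : Int) - 48))).sum

lemma charSum_toDigitsCore (fuel : Nat) : ∀ (n : Nat) (ds : List Char), n < fuel →
    charSum (Nat.toDigitsCore 10 fuel n ds) = dsum n + charSum ds := by
  induction fuel with
  | zero => intro n ds h; omega
  | succ f ih =>
    intro n ds h
    rw [Nat.toDigitsCore]
    by_cases hz : n / 10 = 0
    · simp only [hz, reduceIte]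
      have hn : n < 10 := by omega
      by_cases hn0 : n = 0
      · subst hn0; simp [charSum, dsum, digitChar_val 0 (by norm_num)]
      · rw [dsum_eq n (by omega), hz]
        simp [charSum, dsum, digitChar_val (n % 10) (Nat.mod_lt n (by norm_num))]
    · simp only [if_neg hz]
      have hlt : n / 10 < f := by
        have := Nat.div_lt_self (by omega : 0 < n) (by norm_num : 1 < 10)
        omega
      rw [ih (n / 10) _ hlt]
      rw [dsum_eq n (by omega)]
      simp [charSum, digitChar_val (n % 10) (Nat.mod_lt n (by omega))]
      ring

lemma charSum_toChars (num : Int) (h : 0 < num) :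
    charSum (PySem.Int.toChars num) = dsum num.toNat := by
  unfold PySem.Int.toChars
  rw [if_neg (by omega)]
  rw [Nat.toDigits, charSum_toDigitsCore (num.toNat + 1) num.toNat [] (by omega)]
  simp [charSum]

lemma foldl_charSum (cs : List Char) (a : Int) :
    cs.foldl (fun acc d => acc + ((d.toNat : Int) - 48)) a = a + charSum cs := by
  induction cs generalizing a with
  | nil => simp [charSum]
  | cons c t ih => simp [charSum, ih, List.map, List.sum_cons]; ring

-- ===== VERDICT (by name: the statement is the Claim_ definition above) =====
theorem fn_spec : Claim_equal_fn := by
  intro num _ hpre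
  unfold Spec_fn fn fn_alt
  have hs : fnLoop num 0 =
      (PySem.Int.toStr num).toList.foldl (fun acc d => acc + ((d.toNat : Int) - 48)) 0 := by
    rw [fnLoop_eq num 0 (le_of_lt hpre), PySem.Int.toList_toStr, foldl_charSum,
      charSum_toChars num hpre]
    ring
  rw [hs]
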